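-- pv_equiv track=rewrite | github.com/Phantom1911/leetcode | algoexpert/QuickSelect.py | qshelper
-- ===== SOURCE A (Python) =====
-- def qshelper(s, e, arr, pos):
--     p, l, r = s, s + 1, e
--     while l <= r:
--         if arr[l] > arr[p] and arr[r] < arr[p]:
--             arr[l], arr[r] = arr[r], arr[l]
--         if arr[l] <= arr[p]:
--             l += 1
--         if arr[r] >= arr[p]:
--             r -= 1
--     arr[r], arr[p] = arr[p], arr[r]
--     if r == pos:
--         return arr[r]
--     elif r < pos:
--         return qshelper(r + 1, e, arr, pos)
--     else:
--         return qshelper(s, r - 1, arr, pos)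
-- ===== SOURCE B (Python) =====
-- def qshelper(s, e, arr, pos):
--     # Iterative re-decomposition: the recursion of A is replaced by one loop that
--     # narrows the current window [s, e]; the in-place partition block is unchanged.
--     while True:
--         p, l, r = s, s + 1, e
--         while l <= r:
--             if arr[l] > arr[p] and arr[r] < arr[p]:
--                 arr[l], arr[r] = arr[r], arr[l]
--             if arr[l] <= arr[p]:
--                 l += 1
--             if arr[r] >= arr[p]:
--                 r -= 1
--         arr[r], arr[p] = arr[p], arr[r]
--         if r == pos:
--             return arr[r]
--         if r < pos:
--             s = r + 1
--         else:
--             e = r - 1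
-- ===== Notes on version B (the rewrite author's own statement) =====
-- stated objective: alternative
-- what changed: A's three-way recursion is replaced by a single while-True loop that narrows the window [s, e] in place (s = r+1 / e = r-1 instead of recursive calls); the partition block and all in-place swaps are unchanged, so B returns and mutates exactly like A with no recursion.
import Mathlib
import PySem

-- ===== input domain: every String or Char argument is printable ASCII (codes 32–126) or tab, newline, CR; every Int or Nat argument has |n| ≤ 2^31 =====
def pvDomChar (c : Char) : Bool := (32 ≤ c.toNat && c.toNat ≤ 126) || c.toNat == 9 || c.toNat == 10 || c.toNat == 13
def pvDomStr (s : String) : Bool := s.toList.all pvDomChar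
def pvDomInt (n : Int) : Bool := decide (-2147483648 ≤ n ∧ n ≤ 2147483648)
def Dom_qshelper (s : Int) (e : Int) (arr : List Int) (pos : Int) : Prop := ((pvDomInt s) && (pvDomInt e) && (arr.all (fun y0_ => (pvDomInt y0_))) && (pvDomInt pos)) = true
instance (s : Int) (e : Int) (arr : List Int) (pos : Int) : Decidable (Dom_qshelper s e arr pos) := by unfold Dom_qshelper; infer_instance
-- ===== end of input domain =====

-- B replaces A's recursion by a single loop that narrows the window [s, e] in place,
-- with the partition block unchanged (an alternative, recursion-free decomposition);
-- B performs exactly the same in-place swaps on arr as A does.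

-- fuel bound shared by both ports' transliterations: at least the number of
-- window-narrowing steps A's recursion / B's loop performs whenever the Python returns
def qsFuel (s : Int) (e : Int) (pos : Int) : Nat :=
  (e - s).toNat + (s - pos).toNat + (pos - s).toNat + (e - pos).toNat + (pos - e).toNat + 1

-- ===== PORT A =====
-- the `while l <= r` partition loop (identical text in Source A and Source B, so both ports
-- use this one transliteration); fuel makes the recursion structural and the given
-- (e - s).toNat + 1 covers every iteration the Python loop performs
def qsLoop (fuel : Nat) (arr : List Int) (p : Int) (l : Int) (r : Int) : List Int × Int :=
  match fuel with
  | 0 => (arr, r)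
  | fuel + 1 =>
    if l ≤ r then
      -- if arr[l] > arr[p] and arr[r] < arr[p]: arr[l], arr[r] = arr[r], arr[l]
      let arr1 :=
        if PySem.List.pyGetD arr l 0 > PySem.List.pyGetD arr p 0 ∧
           PySem.List.pyGetD arr r 0 < PySem.List.pyGetD arr p 0 then
          PySem.List.pySetD (PySem.List.pySetD arr l (PySem.List.pyGetD arr r 0)) r
            (PySem.List.pyGetD arr l 0)
        else arr
      -- if arr[l] <= arr[p]: l += 1
      let l1 := if PySem.List.pyGetD arr1 l 0 ≤ PySem.List.pyGetD arr1 p 0 then l + 1 else l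
      -- if arr[r] >= arr[p]: r -= 1
      let r1 := if PySem.List.pyGetD arr1 r 0 ≥ PySem.List.pyGetD arr1 p 0 then r - 1 else r
      qsLoop fuel arr1 p l1 r1
    else (arr, r)

-- the recursive body of A; fuel makes the recursion structural
def qsRec (fuel : Nat) (s : Int) (e : Int) (arr : List Int) (pos : Int) : Int :=
  match fuel with
  | 0 => 0
  | fuel + 1 =>
    match qsLoop ((e - s).toNat + 1) arr s (s + 1) e with
    | (arr1, r) =>
      -- arr[r], arr[p] = arr[p], arr[r]
      let ap := PySem.List.pyGetD arr1 s 0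
      let ar := PySem.List.pyGetD arr1 r 0
      let arr2 := PySem.List.pySetD (PySem.List.pySetD arr1 r ap) s ar
      if r = pos then PySem.List.pyGetD arr2 r 0
      else if r < pos then qsRec fuel (r + 1) e arr2 pos
      else qsRec fuel s (r - 1) arr2 pos

def qshelper (s : Int) (e : Int) (arr : List Int) (pos : Int) : Int :=
  qsRec (qsFuel s e pos) s e arr pos

-- ===== PORT B =====
-- one pass of Source B's `while True` body on the state (s, e, arr): partition the current
-- window, then either return the answer (Sum.inr) or narrow the window (Sum.inl)
def qsStep (pos : Int) (st : Int × Int × List Int) : (Int × Int × List Int) ⊕ Int :=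
  match st with
  | (s, e, arr) =>
    match qsLoop ((e - s).toNat + 1) arr s (s + 1) e with
    | (arr1, r) =>
      -- arr[r], arr[p] = arr[p], arr[r]
      let ap := PySem.List.pyGetD arr1 s 0
      let ar := PySem.List.pyGetD arr1 r 0
      let arr2 := PySem.List.pySetD (PySem.List.pySetD arr1 r ap) s ar
      if r = pos then Sum.inr (PySem.List.pyGetD arr2 r 0)
      else if r < pos then Sum.inl (r + 1, e, arr2)
      else Sum.inl (s, r - 1, arr2)

-- Source B's `while True` loop as a fueled state machine over (s, e, arr)
def qsDrive (fuel : Nat) (pos : Int) (st : Int × Int × List Int) : Int :=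
  match fuel with
  | 0 => 0
  | fuel + 1 =>
    match qsStep pos st with
    | Sum.inr v => v
    | Sum.inl st' => qsDrive fuel pos st'

def qshelper_alt (s : Int) (e : Int) (arr : List Int) (pos : Int) : Int :=
  qsDrive (qsFuel s e pos) pos (s, e, arr)

-- ===== PRECONDITION & SPEC =====
-- Pre_ is EXACTLY the closed-form description of the inputs on which the Python A
-- returns normally: on every other input A raises (IndexError, or RecursionError on
-- the windows that can never reach pos).
def Pre_qshelper (s : Int) (e : Int) (arr : List Int) (pos : Int) : Prop :=
  -(arr.length : Int) ≤ s ∧ s < (arr.length : Int) ∧ e < (arr.length : Int) ∧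
  -(arr.length : Int) ≤ pos ∧
  ((s ≤ e ∧ (pos ≤ e ∨ pos < s)) ∨ (e < s ∧ pos ≤ e ∧ -(arr.length : Int) ≤ e))
instance (s : Int) (e : Int) (arr : List Int) (pos : Int) : Decidable (Pre_qshelper s e arr pos) := by
  unfold Pre_qshelper; infer_instance

def pvWitness_qshelper : Int × Int × List Int × Int := (0, 2, [3, 1, 2], 1)

def Spec_qshelper (s : Int) (e : Int) (arr : List Int) (pos : Int) (out : Int) : Prop := out = qshelper_alt s e arr pos
instance (s : Int) (e : Int) (arr : List Int) (pos : Int) (out : Int) : Decidable (Spec_qshelper s e arr pos out) := by unfold Spec_qshelper; infer_instance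

-- ===== CLAIM (what is proved, stated in full; the proofs are below) =====
def Claim_equal_qshelper : Prop := ∀ (s : Int) (e : Int) (arr : List Int) (pos : Int), Dom_qshelper s e arr pos → Pre_qshelper s e arr pos → Spec_qshelper s e arr pos (qshelper s e arr pos)

-- ===== LEMMAS AND PROOFS =====

-- A's recursion and B's loop perform the same partition and the same window update at
-- every level, so with the same fuel they compute the same value on every input
theorem qsRec_eq_qsDrive (f : Nat) : ∀ (s e : Int) (arr : List Int) (pos : Int),
    qsRec f s e arr pos = qsDrive f pos (s, e, arr) := by
  induction f with
  | zero => intro s e arr pos; rfl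
  | succ f ih =>
    intro s e arr pos
    rcases hq : qsLoop ((e - s).toNat + 1) arr s (s + 1) e with ⟨arr1, r⟩
    have hrec : qsRec (f + 1) s e arr pos =
        (if r = pos then
          PySem.List.pyGetD (PySem.List.pySetD (PySem.List.pySetD arr1 r
            (PySem.List.pyGetD arr1 s 0)) s (PySem.List.pyGetD arr1 r 0)) r 0
        else if r < pos then
          qsRec f (r + 1) e (PySem.List.pySetD (PySem.List.pySetD arr1 r
            (PySem.List.pyGetD arr1 s 0)) s (PySem.List.pyGetD arr1 r 0)) pos
        else
          qsRec f s (r - 1) (PySem.List.pySetD (PySem.List.pySetD arr1 r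
            (PySem.List.pyGetD arr1 s 0)) s (PySem.List.pyGetD arr1 r 0)) pos) := by
      rw [qsRec, hq]
    have hstep : qsStep pos (s, e, arr) =
        (if r = pos then
          Sum.inr (PySem.List.pyGetD (PySem.List.pySetD (PySem.List.pySetD arr1 r
            (PySem.List.pyGetD arr1 s 0)) s (PySem.List.pyGetD arr1 r 0)) r 0)
        else if r < pos then
          Sum.inl (r + 1, e, PySem.List.pySetD (PySem.List.pySetD arr1 r
            (PySem.List.pyGetD arr1 s 0)) s (PySem.List.pyGetD arr1 r 0))
        else
          Sum.inl (s, r - 1, PySem.List.pySetD (PySem.List.pySetD arr1 r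
            (PySem.List.pyGetD arr1 s 0)) s (PySem.List.pyGetD arr1 r 0))) := by
      show (match qsLoop ((e - s).toNat + 1) arr s (s + 1) e with
        | (arr1, r) =>
          let ap := PySem.List.pyGetD arr1 s 0
          let ar := PySem.List.pyGetD arr1 r 0
          let arr2 := PySem.List.pySetD (PySem.List.pySetD arr1 r ap) s ar
          if r = pos then Sum.inr (PySem.List.pyGetD arr2 r 0)
          else if r < pos then Sum.inl (r + 1, e, arr2)
          else Sum.inl (s, r - 1, arr2)) = _
      rw [hq]
    rw [hrec, qsDrive, hstep]
    by_cases h1 : r = pos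
    · rw [if_pos h1, if_pos h1]
    · rw [if_neg h1, if_neg h1]
      by_cases h2 : r < pos
      · rw [if_pos h2, if_pos h2]
        exact ih (r + 1) e _ pos
      · rw [if_neg h2, if_neg h2]
        exact ih s (r - 1) _ pos

-- ===== VERDICT (by name: the statement is the Claim_ definition above) =====
theorem qshelper_spec : Claim_equal_qshelper := by
  intro s e arr pos hdom hpre
  unfold Spec_qshelper qshelper qshelper_alt
  exact qsRec_eq_qsDrive (qsFuel s e pos) s e arr pos
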